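-- pv_equiv track=rewrite | github.com/MrBrantCode/unitest_baseline | mut_generate/mist_train_taco/taco_14357/solution.py | maximize_surprise_value
-- ===== SOURCE A (Python) =====
-- def maximize_surprise_value(t, test_cases):
--     results = []
--
--     for case in test_cases:
--         n, m, expected_points, correct_answers = case
--         M = [list(map(int, list(answers))) for answers in correct_answers]
--         o = [bin(i).count('1') for i in range(1 << n)]
--         q = [sum((1 << i for i in range(n) if M[i][j])) for j in range(m)]
--         b = -1
--
--         for i in range(1 << n):
--             c = [0] * (n + 1)
--             v = [0] * m
--             d = c[:]
--             P = v[:]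
--
--             for j in range(m):
--                 v[j] = o[i ^ q[j]]
--                 c[v[j]] += 1
--
--             for j in range(n):
--                 d[j + 1] = d[j] + c[j]
--
--             for j in range(m):
--                 d[v[j]] += 1
--                 P[j] = d[v[j]]
--
--             T = 2 * sum((expected_points[j] for j in range(n) if i >> j & 1)) - sum(expected_points) + sum(((o[q[j]] - 2 * o[i & q[j]]) * P[j] for j in range(m)))
--
--             if T > b:
--                 b, p = T, P
--
--         results.append(p)
--
--     return results
-- ===== SOURCE B (Python) =====
-- def maximize_surprise_value(t, test_cases):
--     results = []
--     for n, m, expected_points, correct_answers in test_cases: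
--         q = [sum(1 << i for i in range(n) if int(correct_answers[i][j])) for j in range(m)]
--         total = sum(expected_points)
--         best_T = None
--         best_P = None
--         for i in range(1 << n):
--             v = [bin(i ^ qj).count('1') for qj in q]
--             P = [sum(1 for k in range(m) if v[k] < v[j])
--                  + sum(1 for k in range(j + 1) if v[k] == v[j])
--                  for j in range(m)]
--             T = (2 * sum(expected_points[j] for j in range(n) if i >> j & 1) - total
--                  + sum((bin(q[j]).count('1') - 2 * bin(i & q[j]).count('1')) * P[j]
--                        for j in range(m)))
--             if best_T is None or T > best_T:
--                 best_T, best_P = T, P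
--         results.append(best_P)
--     return results
-- ===== Notes on version B (the rewrite author's own statement) =====
-- stated objective: alternative
-- what changed: B drops A's digit matrix M, the precomputed popcount table o and the counting-sort ranking (the c/d prefix-table triple loop), computing ranks by a direct pairwise formula P[j] = #{k: v[k]<v[j]} + #{k<=j: v[k]==v[j]} and popcounts on demand, and replaces the b=-1 sentinel argmax with a None-guarded running maximum; the 2^n mask scan and the T formula (the task's specification) are kept. …
-- outside the precondition, e.g. on maximize_surprise_value(0, [(1, 0, [-5, 3], [])]): A returns [[]], B returns [[]]
import Mathlib
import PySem

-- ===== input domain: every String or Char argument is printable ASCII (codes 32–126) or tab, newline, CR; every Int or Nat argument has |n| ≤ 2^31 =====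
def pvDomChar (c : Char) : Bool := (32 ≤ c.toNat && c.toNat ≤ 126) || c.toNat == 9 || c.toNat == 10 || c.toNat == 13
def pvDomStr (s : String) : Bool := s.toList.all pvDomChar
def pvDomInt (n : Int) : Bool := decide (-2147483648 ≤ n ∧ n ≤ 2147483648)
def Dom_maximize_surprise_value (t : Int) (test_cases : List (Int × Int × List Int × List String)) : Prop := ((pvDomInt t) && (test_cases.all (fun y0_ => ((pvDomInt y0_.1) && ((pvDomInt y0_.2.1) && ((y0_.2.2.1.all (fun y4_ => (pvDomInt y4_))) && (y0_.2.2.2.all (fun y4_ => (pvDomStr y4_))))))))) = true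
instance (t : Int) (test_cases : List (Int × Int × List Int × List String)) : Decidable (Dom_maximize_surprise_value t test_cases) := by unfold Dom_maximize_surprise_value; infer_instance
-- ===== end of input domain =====

-- B replaces A's digit matrix / popcount table / counting-sort ranking by on-demand popcounts and a
-- direct pairwise rank formula, and the b = -1 argmax sentinel by a None-guarded running maximum
-- (objective: alternative; same 2^n brute-force scan, which is the task itself).

-- ===== PORT A =====
-- bin(x).count('1') (both Pythons compute popcounts of nonnegative ints this way)
def pvPc (x : Nat) : Nat :=
  if h : x = 0 then 0 else x % 2 + pvPc (x / 2)
decreasing_by exact Nat.div_lt_self (Nat.pos_of_ne_zero h) (by omega)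

-- int(ch) for a single char: exact on '0'..'9' (Pre_ excludes other characters, where Python raises)
def pvIntChar (ch : Char) : Int := (ch.toNat : Int) - 48

-- M = [list(map(int, list(answers))) for answers in correct_answers]
def pvMA (ans : List String) : List (List Int) := ans.map (fun s => s.toList.map pvIntChar)

-- o = [bin(i).count('1') for i in range(1 << n)]
def pvOA (nN : Nat) : List Nat := (List.range (2 ^ nN)).map pvPc

-- q = [sum((1 << i for i in range(n) if M[i][j])) for j in range(m)]
def pvQA (nN mN : Nat) (M : List (List Int)) : List Nat :=
  (List.range mN).map (fun j =>
    ((List.range nN).filter (fun i => !((M.getD i []).getD j 0 == 0))).foldl (fun a i => a + 2 ^ i) 0)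

-- the j-loop filling v:  v[j] = o[i ^ q[j]]
def pvVA (o q : List Nat) (mN i : Nat) : List Nat :=
  (List.range mN).map (fun j => o.getD (i ^^^ q.getD j 0) 0)

-- the counter array c (c[v[j]] += 1), kept as an integer array Nat → Int (same reads/writes)
def pvCA (v : List Nat) : Nat → Int :=
  v.foldl (fun c x => fun y => if y = x then c y + 1 else c y) (fun _ => 0)

-- d = c[:] (all zeros at that point); for j in range(n): d[j+1] = d[j] + c[j]
def pvDA (nN : Nat) (c : Nat → Int) : Nat → Int :=
  (List.range nN).foldl (fun d j => fun y => if y = j + 1 then d j + c j else d y) (fun _ => 0)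

-- for j in range(m): d[v[j]] += 1; P[j] = d[v[j]]
def pvPA (d : Nat → Int) (v : List Nat) : List Int :=
  (v.foldl (fun (s : (Nat → Int) × List Int) x =>
      ((fun y => if y = x then s.1 x + 1 else s.1 y), s.2 ++ [s.1 x + 1])) (d, [])).2

-- T = 2*sum(e[j] for j in range(n) if i>>j&1) - sum(e) + sum((o[q[j]] - 2*o[i&q[j]])*P[j] for j in range(m))
def pvTA (e : List Int) (o q : List Nat) (P : List Int) (nN mN i : Nat) : Int :=
  2 * (((List.range nN).filter (fun j => !((i >>> j) &&& 1 == 0))).foldl (fun a j => a + e.getD j 0) 0)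
    - e.foldl (· + ·) 0
    + (List.range mN).foldl
        (fun a j => a + ((o.getD (q.getD j 0) 0 : Int) - 2 * (o.getD (i &&& q.getD j 0) 0 : Int)) * P.getD j 0) 0

-- the body of A's outer loop over one test case; p0 is the (carried-over) value of p.
-- Python raises NameError when p was never assigned; Pre_ excludes those inputs, `none` stands in.
def pvCaseA (p0 : Option (List Int)) (n m : Int) (e : List Int) (ans : List String) : Option (List Int) :=
  let nN := n.toNat
  let mN := m.toNat
  let M := pvMA ans
  let o := pvOA nN
  let q := pvQA nN mN M
  ((List.range (2 ^ nN)).foldl (fun (bp : Int × Option (List Int)) i =>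
      let v := pvVA o q mN i
      let c := pvCA v
      let d := pvDA nN c
      let P := pvPA d v
      let T := pvTA e o q P nN mN i
      if T > bp.1 then (T, some P) else bp) ((-1 : Int), p0)).2

def maximize_surprise_value (t : Int) (test_cases : List (Int × Int × List Int × List String)) : List (List Int) :=
  (test_cases.foldl (fun (st : List (List Int) × Option (List Int)) case =>
      let p := pvCaseA st.2 case.1 case.2.1 case.2.2.1 case.2.2.2
      (st.1 ++ [p.getD []], p)) ([], none)).1

-- ===== PORT B =====
-- q = [sum(1 << i for i in range(n) if int(correct_answers[i][j])) for j in range(m)]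
def pvQB (nN mN : Nat) (ans : List String) : List Nat :=
  (List.range mN).map (fun j =>
    (List.range nN).foldl
      (fun a i => if !(pvIntChar ((ans.getD i "").toList.getD j '0') == 0) then a + 2 ^ i else a) 0)

-- v = [bin(i ^ qj).count('1') for qj in q]
def pvVB (q : List Nat) (i : Nat) : List Nat := q.map (fun qj => pvPc (i ^^^ qj))

-- P[j] = sum(1 for k in range(m) if v[k] < v[j]) + sum(1 for k in range(j+1) if v[k] == v[j])
def pvPB (mN : Nat) (v : List Nat) : List Int :=
  (List.range mN).map (fun j =>
    ((v.filter (fun x => decide (x < v.getD j 0))).length : Int)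
      + ((v.take (j + 1)).filter (fun x => x == v.getD j 0)).length)

-- T, with total = sum(expected_points) precomputed and popcounts taken on demand
def pvTB (e : List Int) (total : Int) (q : List Nat) (P : List Int) (nN mN i : Nat) : Int :=
  2 * (((List.range nN).filter (fun j => !((i >>> j) &&& 1 == 0))).foldl (fun a j => a + e.getD j 0) 0)
    - total
    + (List.range mN).foldl
        (fun a j => a + ((pvPc (q.getD j 0) : Int) - 2 * (pvPc (i &&& q.getD j 0) : Int)) * P.getD j 0) 0

-- one test case: None-guarded running maximum, first maximum wins
def pvCaseB (n m : Int) (e : List Int) (ans : List String) : List Int :=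
  let nN := n.toNat
  let mN := m.toNat
  let q := pvQB nN mN ans
  let total := e.foldl (· + ·) 0
  ((List.range (2 ^ nN)).foldl (fun (st : Option Int × List Int) i =>
      let v := pvVB q i
      let P := pvPB mN v
      let T := pvTB e total q P nN mN i
      match st.1 with
      | none => (some T, P)
      | some bT => if T > bT then (some T, P) else st) (none, [])).2

def maximize_surprise_value_alt (t : Int) (test_cases : List (Int × Int × List Int × List String)) : List (List Int) :=
  test_cases.foldl (fun res case => res ++ [pvCaseB case.1 case.2.1 case.2.2.1 case.2.2.2]) []

-- ===== PRECONDITION & SPEC =====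
-- Pre_ excludes inputs where A raises (negative n, non-digit characters anywhere in correct_answers,
-- fewer than n answer strings / expected points, answer strings shorter than m) and cases whose
-- expected_points tail beyond index n has positive sum, where A's sentinel b = -1 may never be beaten
-- (then A raises NameError or appends the previous case's stale p); on excluded inputs where A still
-- returns, both programs agree anyway (the bound is a closed-form sufficient condition).
def PreCase (n m : Int) (e : List Int) (ans : List String) : Prop :=
  0 ≤ n
  ∧ (∀ s ∈ ans, ∀ ch ∈ s.toList, 48 ≤ ch.toNat ∧ ch.toNat ≤ 57)
  ∧ (0 < m → n.toNat ≤ ans.length)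
  ∧ (∀ i < n.toNat, m.toNat ≤ (ans.getD i "").toList.length)
  ∧ n.toNat ≤ e.length
  ∧ (e.drop n.toNat).sum ≤ 0

def Pre_maximize_surprise_value (t : Int) (test_cases : List (Int × Int × List Int × List String)) : Prop :=
  ∀ c ∈ test_cases, PreCase c.1 c.2.1 c.2.2.1 c.2.2.2

instance (t : Int) (test_cases : List (Int × Int × List Int × List String)) : Decidable (Pre_maximize_surprise_value t test_cases) := by
  unfold Pre_maximize_surprise_value PreCase; infer_instance

def pvWitness_maximize_surprise_value : Int × (List (Int × Int × List Int × List String)) :=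
  (0, [(1, 0, [1], []), (0, 0, [], [])])

def Spec_maximize_surprise_value (t : Int) (test_cases : List (Int × Int × List Int × List String)) (out : List (List Int)) : Prop := out = maximize_surprise_value_alt t test_cases
instance (t : Int) (test_cases : List (Int × Int × List Int × List String)) (out : List (List Int)) : Decidable (Spec_maximize_surprise_value t test_cases out) := by unfold Spec_maximize_surprise_value; infer_instance

-- ===== CLAIM (what is proved, stated in full; the proofs are below) =====
def Claim_equal_maximize_surprise_value : Prop := ∀ (t : Int) (test_cases : List (Int × Int × List Int × List String)), Dom_maximize_surprise_value t test_cases → Pre_maximize_surprise_value t test_cases → Spec_maximize_surprise_value t test_cases (maximize_surprise_value t test_cases)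

-- ===== LEMMAS AND PROOFS =====

-- popcount basics -------------------------------------------------------------
theorem pvPc_unfold (x : Nat) : pvPc x = x % 2 + pvPc (x / 2) := by
  rw [pvPc]
  split
  · rename_i h; subst h; simp [pvPc]
  · rfl

theorem pvPc_le {n q : Nat} (h : q < 2 ^ n) : pvPc q ≤ n := by
  induction n generalizing q with
  | zero => interval_cases q; simp [pvPc]
  | succ n ih =>
    rw [pvPc_unfold]
    have h2 : q / 2 < 2 ^ n := by
      have := Nat.pow_succ 2 n
      omega
    have := ih h2
    have : q % 2 ≤ 1 := by omega
    omega

theorem pvPc_xor_full {n q : Nat} (h : q < 2 ^ n) :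
    pvPc ((2 ^ n - 1) ^^^ q) = n - pvPc q := by
  induction n generalizing q with
  | zero => interval_cases q; simp [pvPc]
  | succ n ih =>
    have hq2 : q / 2 < 2 ^ n := by have := Nat.pow_succ 2 n; omega
    have hdiv : (2 ^ (n + 1) - 1) / 2 = 2 ^ n - 1 := by
      have := Nat.pow_succ 2 n; have : 2 ^ (n+1) = 2 * 2 ^ n := by rw [Nat.pow_succ]; ring
      omega
    have hmod : (2 ^ (n + 1) - 1) % 2 = 1 := by
      have : 2 ^ (n+1) = 2 * 2 ^ n := by rw [Nat.pow_succ]; ring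
      have : 1 ≤ 2 ^ n := Nat.one_le_two_pow
      omega
    rw [pvPc_unfold, Nat.xor_div_two, hdiv, ih hq2, pvPc_unfold q, Nat.xor_mod_two_eq]
    have hple : pvPc (q / 2) ≤ n := pvPc_le hq2
    have hadd := Nat.add_mod (2 ^ (n + 1) - 1) q 2
    have hq1 : q % 2 ≤ 1 := by omega
    omega

theorem pvFull_testBit {n j : Nat} (h : j < n) : ¬((2 ^ n - 1) >>> j &&& 1 = 0) := by
  rw [Nat.shiftRight_eq_div_pow, Nat.and_one_is_mod]
  have hjn : j ≤ n := le_of_lt h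
  have e : 2 ^ n = 2 ^ j * 2 ^ (n - j) := by rw [← pow_add]; congr 1; omega
  have h1 : 1 ≤ 2 ^ j := Nat.one_le_two_pow
  have h2 : 1 ≤ 2 ^ (n - j) := Nat.one_le_two_pow
  have h3 : 2 ^ j * (2 ^ (n - j) - 1) = 2 ^ n - 2 ^ j := by
    rw [Nat.mul_sub, ← e, Nat.mul_one]
  have h4 : 2 ^ j ≤ 2 ^ n := Nat.pow_le_pow_right (by norm_num) hjn
  have key : 2 ^ n - 1 = 2 ^ j * (2 ^ (n - j) - 1) + (2 ^ j - 1) := by omega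
  have hdiv : (2 ^ n - 1) / 2 ^ j = 2 ^ (n - j) - 1 := by
    rw [key, Nat.mul_add_div (by omega), Nat.div_eq_of_lt (by omega)]
    omega
  rw [hdiv]
  have : 2 ^ (n - j) = 2 * 2 ^ (n - j - 1) := by
    rw [← Nat.pow_succ']
    congr 1; omega
  omega

-- generic fold helpers --------------------------------------------------------
theorem pvFoldFilterIf {α β : Type} (l : List α) (p : α → Bool) (f : β → α → β) (a : β) :
    (l.filter p).foldl f a = l.foldl (fun acc x => if p x then f acc x else acc) a := by
  induction l generalizing a with
  | nil => rfl
  | cons x tl ih =>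
    by_cases h : p x <;> simp [h, ih]

theorem pvFoldAddSum (n : Nat) (f : Nat → Int) (a : Int) :
    (List.range n).foldl (fun a j => a + f j) a = a + ∑ j ∈ Finset.range n, f j := by
  induction n generalizing a with
  | zero => simp
  | succ n ih =>
    rw [List.range_succ, List.foldl_append, ih, Finset.sum_range_succ]
    simp [add_assoc]

theorem pvFoldPow (n : Nat) (p : Nat → Bool) (a : Nat) :
    (List.range n).foldl (fun a i => if p i then a + 2 ^ i else a) a ≤ a + (2 ^ n - 1) := by
  induction n generalizing a with
  | zero => simp
  | succ n ih =>
    rw [List.range_succ, List.foldl_append]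
    have h1 := ih a
    have h2 : 2 ^ (n + 1) = 2 * 2 ^ n := by rw [Nat.pow_succ]; ring
    simp only [List.foldl_cons, List.foldl_nil]
    split <;> omega

theorem pvGetDMapRange {α : Type} (n j : Nat) (f : Nat → α) (d : α) (h : j < n) :
    ((List.range n).map f).getD j d = f j := by
  rw [List.getD_eq_getElem _ _ (by simpa using h)]
  simp

theorem pvMapGetD {α β : Type} (l : List α) (f : α → β) (j : Nat) (d : α) (d' : β) (h : j < l.length) :
    (l.map f).getD j d' = f (l.getD j d) := by
  rw [List.getD_eq_getElem _ _ (by simpa using h), List.getD_eq_getElem _ _ h]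
  simp

theorem pvMapAsRange {α β : Type} (l : List α) (f : α → β) (d : α) :
    l.map f = (List.range l.length).map (fun j => f (l.getD j d)) := by
  apply List.ext_getElem
  · simp
  · intro i h1 h2
    simp only [List.getElem_map, List.getElem_range]
    rw [List.getD_eq_getElem _ _ (by simpa using h2)]

theorem pvFilterLenSum {α : Type} (l : List α) (p : α → Bool) (d : α) :
    ((l.filter p).length : Int) = ∑ k ∈ Finset.range l.length, (if p (l.getD k d) then (1 : Int) else 0) := by
  induction l with
  | nil => simp
  | cons x tl ih =>
    rw [List.filter_cons]
    rw [show ((x :: tl).length) = tl.length + 1 from rfl, Finset.sum_range_succ']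
    simp only [List.getD_cons_succ, List.getD_cons_zero]
    split <;> push_cast [List.length_cons, ih] <;> ring

-- counting-sort ranks = pairwise closed form ---------------------------------
theorem pvCA_apply (v : List Nat) (y : Nat) : pvCA v y = (v.count y : Int) := by
  suffices h : ∀ (v : List Nat) (c0 : Nat → Int) (y : Nat),
      (v.foldl (fun c x => fun y => if y = x then c y + 1 else c y) c0) y = c0 y + v.count y by
    have := h v (fun _ => 0) y
    unfold pvCA
    rw [this]; ring
  intro v
  induction v with
  | nil => intro c0 y; simp
  | cons x tl ih =>
    intro c0 y
    rw [List.foldl_cons, ih, List.count_cons]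
    by_cases hxy : y = x
    · subst hxy; simp; ring
    · have : (x == y) = false := by simp [Ne.symm hxy]
      simp [hxy, this]

theorem pvDA_apply (nN : Nat) (c : Nat → Int) (x : Nat) (hx : x ≤ nN) :
    pvDA nN c x = ∑ y ∈ Finset.range x, c y := by
  induction nN generalizing x with
  | zero =>
    interval_cases x
    simp [pvDA]
  | succ n ih =>
    have step : pvDA (n + 1) c = (fun y => if y = n + 1 then (pvDA n c) n + c n else (pvDA n c) y) := by
      unfold pvDA
      rw [List.range_succ, List.foldl_append, List.foldl_cons, List.foldl_nil]
    by_cases hx : x = n + 1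
    · subst hx
      simp only [step, if_true]
      rw [ih n le_rfl, Finset.sum_range_succ]
    · have hxn : x ≤ n := by omega
      simp only [step]
      rw [if_neg hx]
      exact ih x hxn

theorem pvCntLtSum (v : List Nat) (x : Nat) :
    ∑ y ∈ Finset.range x, (v.count y : Int) = ((v.filter (fun z => decide (z < x))).length : Int) := by
  induction v with
  | nil => simp
  | cons z tl ih =>
    have hcnt : ∀ y, ((z :: tl).count y : Int) = (tl.count y : Int) + (if y = z then 1 else 0) := by
      intro y
      rw [List.count_cons]
      by_cases h : z = y
      · subst h; simp
      · have : (z == y) = false := by simp [h]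
        simp [this, Ne.symm h]
    simp only [hcnt]
    rw [Finset.sum_add_distrib, ih, Finset.sum_ite_eq' (Finset.range x) z (fun _ => (1 : Int))]
    rw [List.filter_cons]
    by_cases h : z < x
    · simp [h, Finset.mem_range]
      try ring
    · simp [h, Finset.mem_range]

theorem pvLoop3 (rest : List Nat) : ∀ (v pref : List Nat) (Pacc : List Int) (d : Nat → Int),
    (∀ y ∈ rest, d y = ((v.filter (fun z => decide (z < y))).length : Int) + pref.count y) →
    ((rest.foldl (fun (s : (Nat → Int) × List Int) x =>
        ((fun y => if y = x then s.1 x + 1 else s.1 y), s.2 ++ [s.1 x + 1])) (d, Pacc)).2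
      = Pacc ++ (List.range rest.length).map (fun j =>
          ((v.filter (fun z => decide (z < rest.getD j 0))).length : Int)
            + ((pref ++ rest.take (j + 1)).count (rest.getD j 0) : Int)) ) := by
  induction rest with
  | nil => intro v pref Pacc d _; simp
  | cons x tl ih =>
    intro v pref Pacc d hd
    rw [List.foldl_cons]
    have hdx := hd x (List.mem_cons_self ..)
    rw [ih v (pref ++ [x]) (Pacc ++ [d x + 1])
        (fun y => if y = x then d x + 1 else d y) ?_]
    · rw [List.append_assoc]
      congr 1
      rw [show (x :: tl).length = tl.length + 1 from rfl, List.range_succ_eq_map,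
        List.map_cons, List.map_map, List.singleton_append]
      congr 1
      · rw [List.getD_cons_zero, List.take_succ_cons, List.take_zero, hdx,
          List.count_append]
        have h1 : (List.count x [x] : Int) = 1 := by simp
        push_cast
        omega
      · apply List.map_congr_left
        intro j _
        show ((v.filter (fun z => decide (z < (x :: tl).getD (j + 1) 0))).length : Int)
            + (((pref ++ [x]) ++ tl.take (j + 1)).count ((x :: tl).getD (j + 1) 0) : Int)
          = ((v.filter (fun z => decide (z < (x :: tl).getD (Nat.succ j) 0))).length : Int)
            + ((pref ++ (x :: tl).take (Nat.succ j + 1)).count ((x :: tl).getD (Nat.succ j) 0) : Int)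
        rw [List.getD_cons_succ, List.take_succ_cons, ← List.append_cons]
    · intro y hy
      by_cases hyx : y = x
      · subst hyx
        show (if y = y then d y + 1 else d y)
          = ((v.filter (fun z => decide (z < y))).length : Int) + ((pref ++ [y]).count y : Int)
        rw [if_pos rfl, hdx, List.count_append]
        have h1 : (List.count y [y] : Int) = 1 := by simp
        push_cast
        omega
      · show (if y = x then d x + 1 else d y)
          = ((v.filter (fun z => decide (z < y))).length : Int) + ((pref ++ [x]).count y : Int)
        rw [if_neg hyx, hd y (List.mem_cons_of_mem _ hy), List.count_append]
        have h1 : (List.count y [x] : Int) = 0 := by simp [Ne.symm hyx]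
        push_cast
        omega

theorem pvPA_eq_pvPB (nN : Nat) (v : List Nat) (hv : ∀ x ∈ v, x ≤ nN) :
    pvPA (pvDA nN (pvCA v)) v = pvPB v.length v := by
  unfold pvPA pvPB
  rw [pvLoop3 v v [] [] (pvDA nN (pvCA v)) ?_]
  · rw [List.nil_append]
    apply List.map_congr_left
    intro j hj
    have hj' : j < v.length := by simpa using hj
    simp only [List.nil_append]
    congr 1
    rw [List.count_eq_length_filter]
  · intro y hy
    rw [pvDA_apply nN (pvCA v) y (hv y hy)]
    have : ∀ z, pvCA v z = (v.count z : Int) := fun z => pvCA_apply v z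
    simp only [this]
    rw [pvCntLtSum]
    simp

-- selection-fold lemmas -------------------------------------------------------
theorem pvPickAligned (f : Nat → Int) (g : Nat → List Int) (L : List Nat) :
    ∀ (b : Int) (p : List Int),
    L.foldl (fun (bp : Int × Option (List Int)) i => if f i > bp.1 then (f i, some (g i)) else bp) (b, some p)
      = (fun r => (r.1, some r.2)) (L.foldl (fun (bp : Int × List Int) i => if f i > bp.1 then (f i, g i) else bp) (b, p)) := by
  induction L with
  | nil => intro b p; rfl
  | cons x tl ih =>
    intro b p
    rw [List.foldl_cons, List.foldl_cons]
    by_cases h : f x > b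
    · rw [if_pos h, if_pos h, ih]
    · rw [if_neg h, if_neg h, ih]

theorem pvPickBridge (f : Nat → Int) (g : Nat → List Int) (L : List Nat) :
    ∀ (b0 : Int) (p0 : Option (List Int)) (b1 : Int) (p1 : List Int),
    (∃ i ∈ L, max b0 b1 < f i) →
    L.foldl (fun (bp : Int × Option (List Int)) i => if f i > bp.1 then (f i, some (g i)) else bp) (b0, p0)
      = (fun r => (r.1, some r.2)) (L.foldl (fun (bp : Int × List Int) i => if f i > bp.1 then (f i, g i) else bp) (b1, p1)) := by
  induction L with
  | nil =>
    intro b0 p0 b1 p1 hex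
    obtain ⟨i, hi, _⟩ := hex
    exact absurd hi (List.not_mem_nil)
  | cons x tl ih =>
    intro b0 p0 b1 p1 hex
    rw [List.foldl_cons, List.foldl_cons]
    by_cases h0 : f x > b0 <;> by_cases h1 : f x > b1
    · rw [if_pos h0, if_pos h1, pvPickAligned]
    · rw [if_pos h0, if_neg h1]
      apply ih
      obtain ⟨i, hi, hfi⟩ := hex
      have hix : i ≠ x := by
        intro hcontr; subst hcontr
        simp only [gt_iff_lt, not_lt] at h1
        omega
      refine ⟨i, ?_, ?_⟩
      · rcases List.mem_cons.mp hi with h | h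
        · exact absurd h hix
        · exact h
      · simp only [gt_iff_lt, not_lt] at h1
        omega
    · rw [if_neg h0, if_pos h1]
      apply ih
      obtain ⟨i, hi, hfi⟩ := hex
      have hix : i ≠ x := by
        intro hcontr; subst hcontr
        simp only [gt_iff_lt, not_lt] at h0
        omega
      refine ⟨i, ?_, ?_⟩
      · rcases List.mem_cons.mp hi with h | h
        · exact absurd h hix
        · exact h
      · simp only [gt_iff_lt, not_lt] at h0
        omega
    · rw [if_neg h0, if_neg h1]
      apply ih
      obtain ⟨i, hi, hfi⟩ := hex
      have hix : i ≠ x := by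
        intro hcontr; subst hcontr
        simp only [gt_iff_lt, not_lt] at h0 h1
        omega
      refine ⟨i, ?_, hfi⟩
      rcases List.mem_cons.mp hi with h | h
      · exact absurd h hix
      · exact h

theorem pvPickB (f : Nat → Int) (g : Nat → List Int) (L : List Nat) :
    ∀ (b : Int) (p : List Int),
    L.foldl (fun (st : Option Int × List Int) i =>
        match st.1 with
        | none => (some (f i), g i)
        | some bT => if f i > bT then (some (f i), g i) else st) (some b, p)
      = (fun r => (some r.1, r.2)) (L.foldl (fun (bp : Int × List Int) i => if f i > bp.1 then (f i, g i) else bp) (b, p)) := by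
  induction L with
  | nil => intro b p; rfl
  | cons x tl ih =>
    intro b p
    rw [List.foldl_cons, List.foldl_cons]
    by_cases h : f x > b
    · simp only [if_pos h]
      exact ih (f x) (g x)
    · simp only [if_neg h]
      exact ih b p

theorem pvSelect (f : Nat → Int) (g : Nat → List Int) (N : Nat) (p0 : Option (List Int))
    (hN : 0 < N) (hex : ∃ i ∈ List.range N, 0 ≤ f i) :
    ((List.range N).foldl (fun (bp : Int × Option (List Int)) i => if f i > bp.1 then (f i, some (g i)) else bp) (-1, p0)).2
      = some (((List.range N).foldl (fun (st : Option Int × List Int) i =>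
          match st.1 with
          | none => (some (f i), g i)
          | some bT => if f i > bT then (some (f i), g i) else st) (none, [])).2) := by
  obtain ⟨k, hk⟩ : ∃ k, N = k + 1 := ⟨N - 1, by omega⟩
  subst hk
  rw [List.range_succ_eq_map]
  rw [List.foldl_cons, List.foldl_cons]
  set L := (List.range k).map Nat.succ with hL
  by_cases h0 : f 0 > -1
  · rw [if_pos h0]
    rw [pvPickAligned f g L (f 0) (g 0), pvPickB f g L (f 0) (g 0)]
  · rw [if_neg h0]
    have hex2 : ∃ i ∈ L, max (-1) (f 0) < f i := by
      obtain ⟨i, hi, hfi⟩ := hex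
      rw [List.range_succ_eq_map] at hi
      have hi0 : i ≠ 0 := by
        intro hcontr; subst hcontr
        simp only [gt_iff_lt, not_lt] at h0
        omega
      refine ⟨i, ?_, ?_⟩
      · rcases List.mem_cons.mp hi with h | h
        · exact absurd h hi0
        · exact h
      · simp only [gt_iff_lt, not_lt] at h0
        have : max (-1) (f 0) = -1 := by omega
        omega
    rw [pvPickBridge f g L (-1) p0 (f 0) (g 0) hex2, pvPickB f g L (f 0) (g 0)]

-- existence of a mask with T ≥ 0 ---------------------------------------------
theorem pvQB_bound (nN mN : Nat) (ans : List String) :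
    ∀ x ∈ pvQB nN mN ans, x < 2 ^ nN := by
  intro x hx
  unfold pvQB at hx
  obtain ⟨j, _, hj⟩ := List.mem_map.mp hx
  have h1 : 1 ≤ 2 ^ nN := Nat.one_le_two_pow
  have h2 : (List.range nN).foldl
      (fun a i => if !(pvIntChar ((ans.getD i "").toList.getD j '0') == 0) then a + 2 ^ i else a) 0 ≤ 0 + (2 ^ nN - 1) :=
    pvFoldPow nN _ 0
  omega

theorem pvOA_getD (nN x : Nat) (h : x < 2 ^ nN) : (pvOA nN).getD x 0 = pvPc x := by
  unfold pvOA
  exact pvGetDMapRange (2 ^ nN) x pvPc 0 h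


theorem pvRankRev (mN nN : Nat) (v : List Nat) (hl : v.length = mN) (hv : ∀ x ∈ v, x ≤ nN) :
    pvPB mN (v.map (fun x => nN - x)) = (List.range mN).map (fun j =>
      ((v.filter (fun x => decide (v.getD j 0 < x))).length : Int)
        + ((v.take (j + 1)).filter (fun x => x == v.getD j 0)).length) := by
  unfold pvPB
  apply List.map_congr_left
  intro j hj
  have hj' : j < v.length := by rw [hl]; simpa using hj
  have hgd : v.getD j 0 = v[j] := List.getD_eq_getElem v 0 hj'
  have hjmem : v.getD j 0 ∈ v := by rw [hgd]; exact List.getElem_mem hj'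
  have hjb : v.getD j 0 ≤ nN := hv _ hjmem
  have hget : (v.map (fun x => nN - x)).getD j 0 = nN - v.getD j 0 :=
    pvMapGetD v (fun x => nN - x) j 0 0 hj'
  rw [hget]
  congr 1
  · rw [List.filter_map, List.length_map]
    have hpred : ∀ x ∈ v, ((fun x => decide (x < nN - v.getD j 0)) ∘ fun x => nN - x) x
        = (fun x => decide (v.getD j 0 < x)) x := by
      intro x hx
      have hxb := hv x hx
      simp only [Function.comp_apply, decide_eq_decide]
      omega
    rw [List.filter_congr hpred]
  · rw [← List.map_take, List.filter_map, List.length_map]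
    have hpred : ∀ x ∈ v.take (j + 1), ((fun x => x == nN - v.getD j 0) ∘ fun x => nN - x) x
        = (fun x => x == v.getD j 0) x := by
      intro x hx
      have hxb := hv x (List.mem_of_mem_take hx)
      simp only [Function.comp_apply]
      rw [Bool.eq_iff_iff]
      simp only [beq_iff_eq]
      omega
    rw [List.filter_congr hpred]

theorem pvSNonneg (m : Nat) (v : Nat → Int) :
    0 ≤ ∑ j ∈ Finset.range m, v j *
        ((∑ k ∈ Finset.range m, if v k < v j then (1 : Int) else 0)
          - (∑ k ∈ Finset.range m, if v j < v k then (1 : Int) else 0)) := by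
  set F : Nat → Nat → Int := fun j k =>
    v j * (if v k < v j then (1 : Int) else 0) - v j * (if v j < v k then (1 : Int) else 0) with hF
  have hrw : ∑ j ∈ Finset.range m, v j *
      ((∑ k ∈ Finset.range m, if v k < v j then (1 : Int) else 0)
        - (∑ k ∈ Finset.range m, if v j < v k then (1 : Int) else 0))
      = ∑ j ∈ Finset.range m, ∑ k ∈ Finset.range m, F j k := by
    apply Finset.sum_congr rfl
    intro j _
    rw [mul_sub, Finset.mul_sum, Finset.mul_sum, ← Finset.sum_sub_distrib]
  rw [hrw]
  have hswap : ∑ j ∈ Finset.range m, ∑ k ∈ Finset.range m, F j k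
      = ∑ j ∈ Finset.range m, ∑ k ∈ Finset.range m, F k j := Finset.sum_comm
  have h2 : (∑ j ∈ Finset.range m, ∑ k ∈ Finset.range m, F j k)
      + (∑ j ∈ Finset.range m, ∑ k ∈ Finset.range m, F j k)
      = ∑ j ∈ Finset.range m, ∑ k ∈ Finset.range m, (F j k + F k j) := by
    nth_rewrite 2 [hswap]
    rw [← Finset.sum_add_distrib]
    apply Finset.sum_congr rfl
    intro j _
    rw [← Finset.sum_add_distrib]
  have h3 : ∀ j k, 0 ≤ F j k + F k j := by
    intro j k
    simp only [hF]
    split_ifs <;> omega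
  have h4 : 0 ≤ ∑ j ∈ Finset.range m, ∑ k ∈ Finset.range m, (F j k + F k j) :=
    Finset.sum_nonneg fun j _ => Finset.sum_nonneg fun k _ => h3 j k
  linarith

theorem pvTakeSum (e : List Int) (n : Nat) (h : n ≤ e.length) :
    ∑ j ∈ Finset.range n, e.getD j 0 = (e.take n).sum := by
  induction n with
  | zero => simp
  | succ n ih =>
    have hn : n < e.length := by omega
    rw [Finset.sum_range_succ, ih (by omega)]
    have ht : List.take (n + 1) e = List.take n e ++ [e[n]] := by
      rw [List.take_add_one, List.getElem?_eq_getElem hn]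
      rfl
    rw [ht, List.sum_append]
    simp [List.getElem?_eq_getElem hn]

theorem pvExistsT (n m : Int) (e : List Int) (ans : List String) (h : PreCase n m e ans) :
    ∃ i ∈ List.range (2 ^ n.toNat), 0 ≤
      pvTB e (e.foldl (· + ·) 0) (pvQB n.toNat m.toNat ans)
        (pvPB m.toNat (pvVB (pvQB n.toNat m.toNat ans) i)) n.toNat m.toNat i := by
  obtain ⟨hn, hdig, hlen, hstr, hel, htail⟩ := h
  set nN := n.toNat with hnN
  set mN := m.toNat with hmN
  set q := pvQB nN mN ans with hqdef
  have hqlen : q.length = mN := by rw [hqdef]; unfold pvQB; simp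
  have hqb : ∀ x ∈ q, x < 2 ^ nN := pvQB_bound nN mN ans
  have hpos : 0 < 2 ^ nN := Nat.two_pow_pos nN
  have hpc0 : pvPc 0 = 0 := by simp [pvPc]
  set T : Nat → Int := fun i =>
    pvTB e (e.foldl (· + ·) 0) q (pvPB mN (pvVB q i)) nN mN i with hT
  set v0 : List Nat := q.map pvPc with hv0
  have hv0len : v0.length = mN := by rw [hv0, List.length_map, hqlen]
  have hv0b : ∀ x ∈ v0, x ≤ nN := by
    intro x hx
    rw [hv0] at hx
    obtain ⟨qj, hqj, rfl⟩ := List.mem_map.mp hx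
    exact pvPc_le (hqb qj hqj)
  have hVB0 : pvVB q 0 = v0 := by
    rw [hv0]; unfold pvVB
    apply List.map_congr_left
    intro x _
    rw [Nat.zero_xor]
  set F := 2 ^ nN - 1 with hFdef
  have hVBF : pvVB q F = v0.map (fun x => nN - x) := by
    rw [hv0, List.map_map]; unfold pvVB
    apply List.map_congr_left
    intro qj hqj
    show pvPc (F ^^^ qj) = nN - pvPc qj
    exact pvPc_xor_full (hqb qj hqj)
  have hv0get : ∀ j < mN, v0.getD j 0 = pvPc (q.getD j 0) := by
    intro j hj
    rw [hv0]
    exact pvMapGetD q pvPc j 0 0 (by omega)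
  set vi : Nat → Int := fun k => ((v0.getD k 0 : Nat) : Int) with hvi
  set cLt : Nat → Int := fun j => ((v0.filter (fun x => decide (x < v0.getD j 0))).length : Int) with hcLt
  set cGt : Nat → Int := fun j => ((v0.filter (fun x => decide (v0.getD j 0 < x))).length : Int) with hcGt
  set cEq : Nat → Int := fun j => (((v0.take (j + 1)).filter (fun x => x == v0.getD j 0)).length : Int) with hcEq
  have hP0 : ∀ j < mN, (pvPB mN v0).getD j 0 = cLt j + cEq j := by
    intro j hj
    unfold pvPB
    exact pvGetDMapRange mN j _ 0 hj
  have hPF : ∀ j < mN, (pvPB mN (v0.map (fun x => nN - x))).getD j 0 = cGt j + cEq j := by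
    intro j hj
    rw [pvRankRev mN nN v0 hv0len hv0b]
    exact pvGetDMapRange mN j _ 0 hj
  have hsel0 : (List.range nN).filter (fun j => !((0 >>> j) &&& 1 == 0)) = [] := by
    apply List.filter_eq_nil_iff.mpr
    intro j _
    simp [Nat.zero_shiftRight]
  have hselF : (List.range nN).filter (fun j => !((F >>> j) &&& 1 == 0)) = List.range nN := by
    apply List.filter_eq_self.mpr
    intro j hj
    have hj' : j < nN := by simpa using hj
    have hne := pvFull_testBit hj'
    simpa using hne
  have hT0 : T 0 = -(e.foldl (· + ·) 0) + ∑ j ∈ Finset.range mN, vi j * (cLt j + cEq j) := by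
    rw [hT]
    show pvTB e (e.foldl (· + ·) 0) q (pvPB mN (pvVB q 0)) nN mN 0 = _
    unfold pvTB
    rw [hsel0, List.foldl_nil, hVB0]
    rw [pvFoldAddSum mN (fun j => ((pvPc (q.getD j 0) : Int) - 2 * (pvPc (0 &&& q.getD j 0) : Int)) * (pvPB mN v0).getD j 0) 0]
    have hc : ∀ j ∈ Finset.range mN,
        ((pvPc (q.getD j 0) : Int) - 2 * (pvPc (0 &&& q.getD j 0) : Int)) * (pvPB mN v0).getD j 0
          = vi j * (cLt j + cEq j) := by
      intro j hj
      have hj' : j < mN := Finset.mem_range.mp hj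
      rw [Nat.zero_and, hpc0, hP0 j hj']
      simp only [hvi, hv0get j hj']
      push_cast
      ring
    rw [Finset.sum_congr rfl hc]
    ring
  have hTF : T F = 2 * (e.take nN).sum - (e.foldl (· + ·) 0)
      + ∑ j ∈ Finset.range mN, (-(vi j)) * (cGt j + cEq j) := by
    rw [hT]
    show pvTB e (e.foldl (· + ·) 0) q (pvPB mN (pvVB q F)) nN mN F = _
    unfold pvTB
    rw [hselF, pvFoldAddSum nN (fun j => e.getD j 0) 0, zero_add, pvTakeSum e nN hel, hVBF]
    rw [pvFoldAddSum mN (fun j => ((pvPc (q.getD j 0) : Int) - 2 * (pvPc (F &&& q.getD j 0) : Int)) * (pvPB mN (v0.map (fun x => nN - x))).getD j 0) 0]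
    have hc : ∀ j ∈ Finset.range mN,
        ((pvPc (q.getD j 0) : Int) - 2 * (pvPc (F &&& q.getD j 0) : Int)) * (pvPB mN (v0.map (fun x => nN - x))).getD j 0
          = (-(vi j)) * (cGt j + cEq j) := by
      intro j hj
      have hj' : j < mN := Finset.mem_range.mp hj
      have hjq : j < q.length := by omega
      have hand : F &&& q.getD j 0 = q.getD j 0 := by
        rw [hFdef, Nat.and_comm, Nat.and_two_pow_sub_one_eq_mod]
        exact Nat.mod_eq_of_lt (hqb _ (by rw [List.getD_eq_getElem q 0 hjq]; exact List.getElem_mem hjq))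
      rw [hand, hPF j hj']
      simp only [hvi, hv0get j hj']
      ring
    rw [Finset.sum_congr rfl hc]
    ring
  have hLtSum : ∀ j, cLt j = ∑ k ∈ Finset.range mN, (if vi k < vi j then (1 : Int) else 0) := by
    intro j
    rw [hcLt]
    show ((v0.filter (fun x => decide (x < v0.getD j 0))).length : Int) = _
    rw [pvFilterLenSum v0 _ 0, hv0len]
    apply Finset.sum_congr rfl
    intro k _
    have hiff : ((decide (v0.getD k 0 < v0.getD j 0)) = true) ↔ (vi k < vi j) := by
      rw [hvi]
      simp
    rw [if_congr hiff rfl rfl]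
  have hGtSum : ∀ j, cGt j = ∑ k ∈ Finset.range mN, (if vi j < vi k then (1 : Int) else 0) := by
    intro j
    rw [hcGt]
    show ((v0.filter (fun x => decide (v0.getD j 0 < x))).length : Int) = _
    rw [pvFilterLenSum v0 _ 0, hv0len]
    apply Finset.sum_congr rfl
    intro k _
    have hiff : ((decide (v0.getD j 0 < v0.getD k 0)) = true) ↔ (vi j < vi k) := by
      rw [hvi]
      simp
    rw [if_congr hiff rfl rfl]
  have hS : 0 ≤ ∑ j ∈ Finset.range mN, vi j * (cLt j - cGt j) := by
    have := pvSNonneg mN vi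
    have hco : ∀ j ∈ Finset.range mN, vi j * (cLt j - cGt j)
        = vi j * ((∑ k ∈ Finset.range mN, if vi k < vi j then (1 : Int) else 0)
            - (∑ k ∈ Finset.range mN, if vi j < vi k then (1 : Int) else 0)) := by
      intro j _
      rw [hLtSum j, hGtSum j]
    rw [Finset.sum_congr rfl hco]
    exact this
  have hcomb : ∑ j ∈ Finset.range mN, vi j * (cLt j + cEq j)
      + ∑ j ∈ Finset.range mN, (-(vi j)) * (cGt j + cEq j)
      = ∑ j ∈ Finset.range mN, vi j * (cLt j - cGt j) := by
    rw [← Finset.sum_add_distrib]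
    apply Finset.sum_congr rfl
    intro j _
    ring
  have htot : e.foldl (· + ·) 0 = (e.take nN).sum + (e.drop nN).sum := by
    rw [List.sum_take_add_sum_drop]
    exact List.sum_eq_foldl.symm
  have hkey : 0 ≤ T 0 + T F := by
    rw [hT0, hTF, htot]
    have h1 : T 0 + T F = T 0 + T F := rfl
    have h2 : (e.drop nN).sum ≤ 0 := htail
    nlinarith [hS, hcomb]
  by_cases h0 : 0 ≤ T 0
  · exact ⟨0, List.mem_range.mpr hpos, h0⟩
  · exact ⟨F, List.mem_range.mpr (by omega), by linarith [hkey]⟩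

-- A-side pieces equal B-side pieces ------------------------------------------
theorem pvQ_eq (n m : Int) (e : List Int) (ans : List String) (h : PreCase n m e ans) :
    pvQA n.toNat m.toNat (pvMA ans) = pvQB n.toNat m.toNat ans := by
  obtain ⟨hn, hdig, hlen, hstr, hel, htail⟩ := h
  unfold pvQA pvQB
  apply List.map_congr_left
  intro j hj
  have hj' : j < m.toNat := by simpa using hj
  rw [pvFoldFilterIf]
  apply PySem.List.foldl_congr_mem
  intro a i hi
  have hi' : i < n.toNat := by simpa using hi
  have hm : 0 < m := by omega
  have hans : i < ans.length := lt_of_lt_of_le hi' (hlen hm)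
  have hMi : (pvMA ans).getD i [] = (ans.getD i "").toList.map pvIntChar := by
    unfold pvMA
    rw [pvMapGetD ans _ i "" [] hans]
  have hstr' : j < (ans.getD i "").toList.length := lt_of_lt_of_le hj' (hstr i hi')
  rw [hMi, pvMapGetD _ pvIntChar j '0' 0 hstr']

theorem pvV_eq (nN mN : Nat) (q : List Nat) (hq : ∀ x ∈ q, x < 2 ^ nN) (hl : q.length = mN)
    (i : Nat) (hi : i < 2 ^ nN) :
    pvVA (pvOA nN) q mN i = pvVB q i := by
  unfold pvVA pvVB
  rw [pvMapAsRange q (fun qj => pvPc (i ^^^ qj)) 0, hl]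
  apply List.map_congr_left
  intro j hj
  have hj' : j < mN := by simpa using hj
  have hjq : j < q.length := by omega
  have hqj : q.getD j 0 ∈ q := by
    rw [List.getD_eq_getElem q 0 hjq]
    exact List.getElem_mem hjq
  exact pvOA_getD nN _ (Nat.xor_lt_two_pow hi (hq _ hqj))

theorem pvT_eq (e : List Int) (q : List Nat) (P : List Int) (nN mN i : Nat)
    (hq : ∀ x ∈ q, x < 2 ^ nN) (hi : i < 2 ^ nN) :
    pvTA e (pvOA nN) q P nN mN i = pvTB e (e.foldl (· + ·) 0) q P nN mN i := by
  unfold pvTA pvTB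
  congr 1
  apply PySem.List.foldl_congr_mem
  intro a j _
  have hq1 : q.getD j 0 < 2 ^ nN := by
    by_cases hjq : j < q.length
    · apply hq
      rw [List.getD_eq_getElem q 0 hjq]
      exact List.getElem_mem hjq
    · rw [List.getD_eq_default q 0 (by omega)]
      exact Nat.pos_of_ne_zero (by positivity)
  have hq2 : i &&& q.getD j 0 < 2 ^ nN := lt_of_le_of_lt Nat.and_le_left hi
  rw [pvOA_getD nN _ hq1, pvOA_getD nN _ hq2]

theorem pvCase_eq (p0 : Option (List Int)) (n m : Int) (e : List Int) (ans : List String)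
    (h : PreCase n m e ans) :
    pvCaseA p0 n m e ans = some (pvCaseB n m e ans) := by
  unfold pvCaseA pvCaseB
  simp only []
  have hQ : pvQA n.toNat m.toNat (pvMA ans) = pvQB n.toNat m.toNat ans := pvQ_eq n m e ans h
  rw [hQ]
  set nN := n.toNat
  set mN := m.toNat
  set q := pvQB nN mN ans with hqdef
  have hqlen : q.length = mN := by rw [hqdef]; unfold pvQB; simp
  have hqb : ∀ x ∈ q, x < 2 ^ nN := pvQB_bound nN mN ans
  have hpos : 0 < 2 ^ nN := Nat.two_pow_pos nN
  have hstep : (List.range (2 ^ nN)).foldl (fun (bp : Int × Option (List Int)) i =>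
        let v := pvVA (pvOA nN) q mN i
        let c := pvCA v
        let d := pvDA nN c
        let P := pvPA d v
        let T := pvTA e (pvOA nN) q P nN mN i
        if T > bp.1 then (T, some P) else bp) ((-1 : Int), p0)
      = (List.range (2 ^ nN)).foldl (fun (bp : Int × Option (List Int)) i =>
          if (pvTB e (e.foldl (· + ·) 0) q (pvPB mN (pvVB q i)) nN mN i) > bp.1
          then ((pvTB e (e.foldl (· + ·) 0) q (pvPB mN (pvVB q i)) nN mN i), some (pvPB mN (pvVB q i)))
          else bp) ((-1 : Int), p0) := by
    apply PySem.List.foldl_congr_mem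
    intro acc i hi
    have hi' : i < 2 ^ nN := by simpa using hi
    have hV : pvVA (pvOA nN) q mN i = pvVB q i := pvV_eq nN mN q hqb hqlen i hi'
    have hvlen : (pvVB q i).length = mN := by unfold pvVB; rw [List.length_map, hqlen]
    have hvb : ∀ x ∈ pvVB q i, x ≤ nN := by
      intro x hx
      unfold pvVB at hx
      obtain ⟨qj, hqj, rfl⟩ := List.mem_map.mp hx
      exact pvPc_le (Nat.xor_lt_two_pow hi' (hqb qj hqj))
    have hP : pvPA (pvDA nN (pvCA (pvVB q i))) (pvVB q i) = pvPB mN (pvVB q i) := by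
      rw [pvPA_eq_pvPB nN (pvVB q i) hvb, hvlen]
    have hT : pvTA e (pvOA nN) q (pvPB mN (pvVB q i)) nN mN i
        = pvTB e (e.foldl (· + ·) 0) q (pvPB mN (pvVB q i)) nN mN i :=
      pvT_eq e q (pvPB mN (pvVB q i)) nN mN i hqb hi'
    simp only [hV, hP, hT]
  rw [hstep]
  exact pvSelect (fun i => pvTB e (e.foldl (· + ·) 0) q (pvPB mN (pvVB q i)) nN mN i)
    (fun i => pvPB mN (pvVB q i)) (2 ^ nN) p0 hpos (pvExistsT n m e ans h)

-- ===== VERDICT (by name: the statement is the Claim_ definition above) =====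
theorem maximize_surprise_value_spec : Claim_equal_maximize_surprise_value := by
  unfold Claim_equal_maximize_surprise_value
  intro t tcs _ hpre
  unfold Spec_maximize_surprise_value maximize_surprise_value maximize_surprise_value_alt
  suffices h : ∀ (l : List (Int × Int × List Int × List String)) (res : List (List Int)) (p0 : Option (List Int)),
      (∀ c ∈ l, PreCase c.1 c.2.1 c.2.2.1 c.2.2.2) →
      (l.foldl (fun (st : List (List Int) × Option (List Int)) case =>
          let p := pvCaseA st.2 case.1 case.2.1 case.2.2.1 case.2.2.2
          (st.1 ++ [p.getD []], p)) (res, p0)).1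
        = l.foldl (fun res case => res ++ [pvCaseB case.1 case.2.1 case.2.2.1 case.2.2.2]) res by
    exact h tcs [] none hpre
  intro l
  induction l with
  | nil => intro res p0 _; rfl
  | cons c tl ih =>
    intro res p0 hp
    have hc := hp c (List.mem_cons_self ..)
    have := pvCase_eq p0 c.1 c.2.1 c.2.2.1 c.2.2.2 hc
    simp only [List.foldl_cons, this]
    exact ih _ _ (fun x hx => hp x (List.mem_cons_of_mem _ hx))
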